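-- pv_equiv track=rewrite | github.com/Roeiazran/Codilty-Solutions | exercises/SocksLaundering.py | solution
-- ===== SOURCE A (Python) =====
-- def solution(K, C, D):
--
--     total_socks = 0
--     maxd = max(D)
--     maxc = max(C)
--     mx = max(maxc, maxd)
--     d = len(D)
--     c = len(C)
--
--     count_clean = [0] * mx
--     count_dirty = [0] * mx
--
--     for i in range(c):
--         count_clean[C[i] - 1] += 1
--
--     for i in range(d):
--         count_dirty[D[i] - 1] += 1
--
--
--     for i in range(mx):
--         if not K:
--             break
--
--         if count_clean[i] % 2 == 1:
--
--             if count_dirty[i]: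
--                 count_dirty[i] -= 1
--                 count_clean[i] += 1
--                 K -= 1
--
--     if K > 1:
--         for i in range(mx):
--             while count_dirty[i] >= 2 and K >= 2:
--                 count_clean[i] += 2
--                 count_dirty[i] -= 2
--                 K -= 2
--
--             if K < 2:
--                 break
--
--     for i in range(mx):
--         total_socks += (count_clean[i] // 2)
--
--     return total_socks
-- ===== SOURCE B (Python) =====
-- def solution(K, C, D):
--     mx = max(max(C), max(D))
--     clean = [0] * mx
--     dirty = [0] * mx
--     for x in C:
--         clean[x - 1] += 1
--     for x in D:
--         dirty[x - 1] += 1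
--     base = sum(v // 2 for v in clean)
--     odd_with_dirty = sum(1 for cv, dv in zip(clean, dirty) if cv % 2 == 1 and dv > 0)
--     matched = min(K, odd_with_dirty)
--     K -= matched
--     if K > 1:
--         dirty_pairs = sum((dv - 1) // 2 if cv % 2 == 1 and dv > 0 else dv // 2
--                           for cv, dv in zip(clean, dirty))
--         return base + matched + min(K // 2, dirty_pairs)
--     return base + matched
-- ===== Notes on version B (the rewrite author's own statement) =====
-- stated objective: simpler
-- what changed: B keeps the colour-count arrays but replaces A's two greedy mutate-and-rescan phases (a budget-decrementing pass with break and a nested while loop draining dirty pairs two at a time) by closed-form arithmetic: base pairs = sum(clean//2), matched = min(K, #odd-clean-with-dirty colours), and a phase-2 gain of min(remaining_K//2, adjusted dirty pairs).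
-- outside the precondition, e.g. on solution(-1, [1, 1, 1], [1]): A returns 2, B returns 0
import Mathlib
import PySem

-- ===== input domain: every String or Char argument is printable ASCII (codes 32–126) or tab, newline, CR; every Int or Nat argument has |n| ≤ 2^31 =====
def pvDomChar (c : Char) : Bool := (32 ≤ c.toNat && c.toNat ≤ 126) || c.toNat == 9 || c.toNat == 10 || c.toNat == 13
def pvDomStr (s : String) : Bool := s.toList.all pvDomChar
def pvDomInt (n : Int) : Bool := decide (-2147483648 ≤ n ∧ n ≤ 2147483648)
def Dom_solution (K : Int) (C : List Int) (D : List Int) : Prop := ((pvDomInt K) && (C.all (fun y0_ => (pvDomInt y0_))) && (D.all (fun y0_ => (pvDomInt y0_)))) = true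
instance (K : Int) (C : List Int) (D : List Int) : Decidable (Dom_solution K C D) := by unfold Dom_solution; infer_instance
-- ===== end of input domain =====

-- B replaces A's greedy mutate-and-scan phases (a budget pass with break and a nested while loop
-- draining dirty pairs) by closed-form min arithmetic over the colour counts; objective: simpler.

-- ===== PORT A =====
-- A's phase-1 loop: 'for i in range(mx): if not K: break; …' (recursion over the index list).
def p1loopA : List Int → Int → List Int → List Int → Int × List Int × List Int
  | [], K, cc, cd => (K, cc, cd)
  | i :: rest, K, cc, cd =>
    if K = 0 then (K, cc, cd)
    else
      if PySem.Int.mod (PySem.List.pyGetD cc i 0) 2 = 1 then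
        if PySem.List.pyGetD cd i 0 ≠ 0 then
          p1loopA rest (K - 1)
            (PySem.List.pySetD cc i (PySem.List.pyGetD cc i 0 + 1))
            (PySem.List.pySetD cd i (PySem.List.pyGetD cd i 0 - 1))
        else p1loopA rest K cc cd
      else p1loopA rest K cc cd

-- A's inner 'while count_dirty[i] >= 2 and K >= 2' on the two cell values; returns (K, clean cell, dirty cell).
def p2whileA (K cci cdi : Int) : Int × Int × Int :=
  if h : cdi ≥ 2 ∧ K ≥ 2 then p2whileA (K - 2) (cci + 2) (cdi - 2) else (K, cci, cdi)
  termination_by cdi.toNat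
  decreasing_by omega

-- A's phase-2 loop: 'for i in range(mx): while …; if K < 2: break'.
def p2loopA : List Int → Int → List Int → List Int → Int × List Int × List Int
  | [], K, cc, cd => (K, cc, cd)
  | i :: rest, K, cc, cd =>
    let w := p2whileA K (PySem.List.pyGetD cc i 0) (PySem.List.pyGetD cd i 0)
    let cc' := PySem.List.pySetD cc i w.2.1
    let cd' := PySem.List.pySetD cd i w.2.2
    if w.1 < 2 then (w.1, cc', cd') else p2loopA rest w.1 cc' cd'

def solution (K : Int) (C : List Int) (D : List Int) : Int :=
  let maxd := (PySem.List.max? D (fun y => y)).getD 0   -- max(D); 'none' (ValueError on []) excluded by Pre_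
  let maxc := (PySem.List.max? C (fun y => y)).getD 0   -- max(C)
  let mx := max maxc maxd
  let d : Int := D.length
  let c : Int := C.length
  let cc0 : List Int := List.replicate mx.toNat 0
  let cd0 : List Int := List.replicate mx.toNat 0
  let cc1 := (PySem.List.pyRange 0 c 1).foldl
    (fun a i => PySem.List.pySetD a (PySem.List.pyGetD C i 0 - 1)
      (PySem.List.pyGetD a (PySem.List.pyGetD C i 0 - 1) 0 + 1)) cc0
  let cd1 := (PySem.List.pyRange 0 d 1).foldl
    (fun a i => PySem.List.pySetD a (PySem.List.pyGetD D i 0 - 1)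
      (PySem.List.pyGetD a (PySem.List.pyGetD D i 0 - 1) 0 + 1)) cd0
  let r1 := p1loopA (PySem.List.pyRange 0 mx 1) K cc1 cd1
  let r2 := if r1.1 > 1 then p2loopA (PySem.List.pyRange 0 mx 1) r1.1 r1.2.1 r1.2.2 else r1
  (PySem.List.pyRange 0 mx 1).foldl
    (fun t i => t + PySem.Int.floordiv (PySem.List.pyGetD r2.2.1 i 0) 2) 0

-- ===== PORT B =====
def solution_alt (K : Int) (C : List Int) (D : List Int) : Int :=
  let mx := max ((PySem.List.max? C (fun y => y)).getD 0) ((PySem.List.max? D (fun y => y)).getD 0)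
  let clean := C.foldl
    (fun a x => PySem.List.pySetD a (x - 1) (PySem.List.pyGetD a (x - 1) 0 + 1))
    (List.replicate mx.toNat 0)
  let dirty := D.foldl
    (fun a x => PySem.List.pySetD a (x - 1) (PySem.List.pyGetD a (x - 1) 0 + 1))
    (List.replicate mx.toNat 0)
  let base := (clean.map (fun v => PySem.Int.floordiv v 2)).sum
  let oddWithDirty := (clean.zip dirty).foldl
    (fun n p => if PySem.Int.mod p.1 2 = 1 ∧ p.2 > 0 then n + 1 else n) (0 : Int)
  let matched := min K oddWithDirty
  let K2 := K - matched
  if K2 > 1 then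
    let dirtyPairs := ((clean.zip dirty).map
      (fun p => if PySem.Int.mod p.1 2 = 1 ∧ p.2 > 0
                then PySem.Int.floordiv (p.2 - 1) 2 else PySem.Int.floordiv p.2 2)).sum
    base + matched + min (PySem.Int.floordiv K2 2) dirtyPairs
  else base + matched

-- ===== PRECONDITION & SPEC =====
-- Pre_ excludes: empty C or D (max() raises ValueError), colour values below 1-mx (IndexError on the
-- count arrays), and negative K, which is outside the natural domain of a laundering budget (A's
-- 'if not K' test never fires there, so A's phase-1 loop ignores the budget entirely).
def Pre_solution (K : Int) (C : List Int) (D : List Int) : Prop :=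
  C ≠ [] ∧ D ≠ [] ∧ 0 ≤ K ∧ ∃ y ∈ C ++ D, ∀ x ∈ C ++ D, 1 - y ≤ x
instance (K : Int) (C : List Int) (D : List Int) : Decidable (Pre_solution K C D) := by
  unfold Pre_solution; infer_instance

def pvWitness_solution : Int × List Int × List Int := (2, [1, 2, 2, 3], [1, 3, 3])

def Spec_solution (K : Int) (C : List Int) (D : List Int) (out : Int) : Prop := out = solution_alt K C D
instance (K : Int) (C : List Int) (D : List Int) (out : Int) : Decidable (Spec_solution K C D out) := by
  unfold Spec_solution; infer_instance

-- ===== CLAIM (what is proved, stated in full; the proofs are below) =====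
def Claim_equal_solution : Prop := ∀ (K : Int) (C : List Int) (D : List Int),
  Dom_solution K C D → Pre_solution K C D → Spec_solution K C D (solution K C D)

-- ===== LEMMAS AND PROOFS =====

-- The zipped (clean, dirty) view of A's phase loops (pairs processed front to back).
def phase1Z : Int → List (Int × Int) → Int × List (Int × Int)
  | K, [] => (K, [])
  | K, p :: rest =>
    if K = 0 then (K, p :: rest)
    else if PySem.Int.mod p.1 2 = 1 ∧ p.2 ≠ 0 then
      let r := phase1Z (K - 1) rest
      (r.1, (p.1 + 1, p.2 - 1) :: r.2)
    else
      let r := phase1Z K rest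
      (r.1, p :: r.2)

def phase2Z : Int → List (Int × Int) → List (Int × Int)
  | _, [] => []
  | K, p :: rest =>
    let w := p2whileA K p.1 p.2
    if w.1 < 2 then (w.2.1, w.2.2) :: rest
    else (w.2.1, w.2.2) :: phase2Z w.1 rest

def adjZ (p : Int × Int) : Int × Int :=
  if PySem.Int.mod p.1 2 = 1 ∧ p.2 ≠ 0 then (p.1 + 1, p.2 - 1) else p

def csZ (l : List (Int × Int)) : Int := (l.map (fun p => PySem.Int.floordiv p.1 2)).sum
def dsZ (l : List (Int × Int)) : Int := (l.map (fun p => PySem.Int.floordiv p.2 2)).sum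
def cntZ (l : List (Int × Int)) : Int :=
  l.countP (fun p => decide (PySem.Int.mod p.1 2 = 1 ∧ p.2 ≠ 0))

theorem fd2 (a : Int) : PySem.Int.floordiv a 2 = a / 2 :=
  PySem.Int.floordiv_eq_ediv_of_pos (by omega)

theorem cntZ_nonneg (l : List (Int × Int)) : 0 ≤ cntZ l := Int.natCast_nonneg _

theorem cntZ_cons (p : Int × Int) (rest : List (Int × Int)) :
    cntZ (p :: rest) = (if PySem.Int.mod p.1 2 = 1 ∧ p.2 ≠ 0 then 1 else 0) + cntZ rest := by
  by_cases h : PySem.Int.mod p.1 2 = 1 ∧ p.2 ≠ 0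
  · simp only [cntZ, List.countP_cons, if_pos h, decide_eq_true_eq]
    push_cast; ring
  · simp only [cntZ, List.countP_cons, decide_eq_true_eq]
    rw [if_neg h, if_neg h]; push_cast; ring

theorem fd_odd_succ (a : Int) (h : PySem.Int.mod a 2 = 1) :
    PySem.Int.floordiv (a + 1) 2 = PySem.Int.floordiv a 2 + 1 := by
  rw [PySem.Int.floordiv_eq_ediv_of_pos (by omega), PySem.Int.floordiv_eq_ediv_of_pos (by omega)] at *
  rw [PySem.Int.mod_eq_emod_of_pos (by omega)] at h
  omega

theorem phase1Z_len (l : List (Int × Int)) : ∀ K, ((phase1Z K l).2).length = l.length := by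
  induction l with
  | nil => intro K; rfl
  | cons p rest ih =>
    intro K
    simp only [phase1Z]
    split_ifs with h1 h2 <;> simp [ih]

theorem phase1Z_fst (l : List (Int × Int)) : ∀ K, 0 ≤ K →
    (phase1Z K l).1 = K - min K (cntZ l) := by
  induction l with
  | nil => intro K hK; simp [phase1Z, cntZ]; omega
  | cons p rest ih =>
    intro K hK
    have hc := cntZ_nonneg rest
    by_cases h1 : K = 0
    · simp only [phase1Z, if_pos h1]
      have := cntZ_nonneg (p :: rest); omega
    · by_cases h2 : PySem.Int.mod p.1 2 = 1 ∧ p.2 ≠ 0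
      · simp only [phase1Z, if_neg h1, if_pos h2]
        rw [cntZ_cons, if_pos h2]
        have := ih (K - 1) (by omega)
        simp only [this]; omega
      · simp only [phase1Z, if_neg h1, if_neg h2]
        rw [cntZ_cons, if_neg h2]
        have := ih K hK
        simp only [this]; omega

theorem phase1Z_cs (l : List (Int × Int)) : ∀ K, 0 ≤ K →
    csZ (phase1Z K l).2 = csZ l + min K (cntZ l) := by
  induction l with
  | nil => intro K hK; simp [phase1Z, cntZ, csZ]; omega
  | cons p rest ih =>
    intro K hK
    have hc := cntZ_nonneg rest
    by_cases h1 : K = 0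
    · simp only [phase1Z, if_pos h1]
      have := cntZ_nonneg (p :: rest); omega
    · by_cases h2 : PySem.Int.mod p.1 2 = 1 ∧ p.2 ≠ 0
      · simp only [phase1Z, if_neg h1, if_pos h2]
        rw [cntZ_cons, if_pos h2]
        simp only [csZ, List.map_cons, List.sum_cons] at *
        rw [ih (K - 1) (by omega), fd_odd_succ p.1 h2.1]
        omega
      · simp only [phase1Z, if_neg h1, if_neg h2]
        rw [cntZ_cons, if_neg h2]
        simp only [csZ, List.map_cons, List.sum_cons] at *
        rw [ih K hK]
        omega

theorem adjZ_id_of_cnt_zero (l : List (Int × Int)) : cntZ l = 0 → l.map adjZ = l := by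
  induction l with
  | nil => intro _; rfl
  | cons p rest ih =>
    intro h
    rw [cntZ_cons] at h
    have hc := cntZ_nonneg rest
    by_cases h2 : PySem.Int.mod p.1 2 = 1 ∧ p.2 ≠ 0
    · rw [if_pos h2] at h; omega
    · rw [if_neg h2] at h
      simp only [List.map_cons, adjZ, if_neg h2, ih (by omega)]

theorem phase1Z_all (l : List (Int × Int)) : ∀ K, cntZ l ≤ K → 0 ≤ K →
    (phase1Z K l).2 = l.map adjZ := by
  induction l with
  | nil => intro K _ _; simp [phase1Z]
  | cons p rest ih =>
    intro K hle hK
    have hc := cntZ_nonneg rest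
    rw [cntZ_cons] at hle
    by_cases h2 : PySem.Int.mod p.1 2 = 1 ∧ p.2 ≠ 0
    · rw [if_pos h2] at hle
      have h1 : K ≠ 0 := by omega
      simp only [phase1Z, if_neg h1, if_pos h2, List.map_cons]
      rw [ih (K - 1) (by omega) (by omega)]
      simp only [adjZ, if_pos h2]
    · rw [if_neg h2] at hle
      by_cases h1 : K = 0
      · have h0 : cntZ rest = 0 := by omega
        simp only [phase1Z, if_pos h1, List.map_cons]
        rw [adjZ_id_of_cnt_zero rest h0]
        simp only [adjZ, if_neg h2]
      · simp only [phase1Z, if_neg h1, if_neg h2, List.map_cons]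
        rw [ih K (by omega) hK]
        simp only [adjZ, if_neg h2]

theorem p2whileA_spec (K cci cdi : Int) (hK : 0 ≤ K) (hd : 0 ≤ cdi) :
    p2whileA K cci cdi =
      (K - 2 * min (PySem.Int.floordiv cdi 2) (PySem.Int.floordiv K 2),
       cci + 2 * min (PySem.Int.floordiv cdi 2) (PySem.Int.floordiv K 2),
       cdi - 2 * min (PySem.Int.floordiv cdi 2) (PySem.Int.floordiv K 2)) := by
  induction K, cci, cdi using p2whileA.induct with
  | case1 K cci cdi h ih =>
    rw [p2whileA, dif_pos h, ih (by omega) (by omega)]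
    simp only [fd2] at *
    have h1 : (cdi - 2) / 2 = cdi / 2 - 1 := by omega
    have h2 : (K - 2) / 2 = K / 2 - 1 := by omega
    rw [h1, h2]
    simp only [Prod.mk.injEq]
    refine ⟨by omega, by omega, by omega⟩
  | case2 K cci cdi h =>
    rw [p2whileA, dif_neg h]
    simp only [fd2]
    have : min (cdi / 2) (K / 2) = 0 := by omega
    rw [this]
    simp

theorem dsZ_nonneg (l : List (Int × Int)) (h : ∀ p ∈ l, 0 ≤ p.2) : 0 ≤ dsZ l := by
  induction l with
  | nil => simp [dsZ]
  | cons p rest ih =>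
    simp only [dsZ, List.map_cons, List.sum_cons]
    have h1 := h p (by simp)
    have h2 : 0 ≤ dsZ rest := ih (fun q hq => h q (List.mem_cons_of_mem _ hq))
    simp only [dsZ] at h2
    rw [fd2]
    omega

theorem phase2Z_len (l : List (Int × Int)) : ∀ K, (phase2Z K l).length = l.length := by
  induction l with
  | nil => intro K; rfl
  | cons p rest ih =>
    intro K
    simp only [phase2Z]
    split_ifs <;> simp [ih]

theorem phase2Z_cs (l : List (Int × Int)) : ∀ K, 0 ≤ K → (∀ p ∈ l, 0 ≤ p.2) →
    csZ (phase2Z K l) = csZ l + min (PySem.Int.floordiv K 2) (dsZ l) := by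
  induction l with
  | nil => intro K hK _; simp [phase2Z, csZ, dsZ, fd2]; omega
  | cons p rest ih =>
    intro K hK hpos
    have hp2 : 0 ≤ p.2 := hpos p (by simp)
    have hrest : ∀ q ∈ rest, 0 ≤ q.2 := fun q hq => hpos q (List.mem_cons_of_mem _ hq)
    have hds : 0 ≤ dsZ rest := dsZ_nonneg rest hrest
    rw [show phase2Z K (p :: rest) = (let w := p2whileA K p.1 p.2;
        if w.1 < 2 then (w.2.1, w.2.2) :: rest else (w.2.1, w.2.2) :: phase2Z w.1 rest) from rfl]
    rw [p2whileA_spec K p.1 p.2 hK hp2]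
    set m := min (PySem.Int.floordiv p.2 2) (PySem.Int.floordiv K 2) with hm
    have hm2 : m = min (p.2 / 2) (K / 2) := by rw [hm, fd2, fd2]
    clear_value m
    simp only
    by_cases hbr : K - 2 * m < 2
    · rw [if_pos hbr]
      simp only [csZ, dsZ, List.map_cons, List.sum_cons, fd2] at *
      omega
    · rw [if_neg hbr]
      rw [show csZ ((p.1 + 2 * m, p.2 - 2 * m) :: phase2Z (K - 2 * m) rest)
            = PySem.Int.floordiv (p.1 + 2 * m) 2 + csZ (phase2Z (K - 2 * m) rest) from by
        simp [csZ]]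
      rw [ih (K - 2 * m) (by omega) hrest]
      simp only [csZ, dsZ, List.map_cons, List.sum_cons, fd2] at *
      omega

theorem set_append_len {α : Type} (pc : List α) (a v : α) (t : List α) :
    (pc ++ a :: t).set pc.length v = pc ++ v :: t := by
  induction pc with
  | nil => rfl
  | cons h tl ih => simp [ih]

theorem get_append_len (pc : List Int) (a : Int) (t : List Int) :
    PySem.List.pyGetD (pc ++ a :: t) (pc.length : Int) 0 = a := by
  rw [PySem.List.pyGetD_natCast]
  simp

theorem setD_append_len (pc : List Int) (a v : Int) (t : List Int) :
    PySem.List.pySetD (pc ++ a :: t) (pc.length : Int) v = pc ++ v :: t := by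
  rw [PySem.List.pySetD_natCast]
  exact set_append_len pc a v t

theorem p1_deindex (suf : List (Int × Int)) : ∀ (pc pd : List Int) (K : Int),
    pc.length = pd.length →
    p1loopA (PySem.List.pyRange (pc.length : Int) ((pc.length + suf.length : Nat) : Int) 1) K
      (pc ++ suf.map Prod.fst) (pd ++ suf.map Prod.snd)
    = ((phase1Z K suf).1, pc ++ (phase1Z K suf).2.map Prod.fst,
        pd ++ (phase1Z K suf).2.map Prod.snd) := by
  induction suf with
  | nil =>
    intro pc pd K h
    rw [PySem.List.pyRange_one_eq_nil (by simp)]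
    simp [p1loopA, phase1Z]
  | cons p rest ih =>
    intro pc pd K h
    simp only [List.length_cons]
    rw [PySem.List.pyRange_one_cons (by push_cast; omega)]
    simp only [p1loopA, List.map_cons]
    have hgc : PySem.List.pyGetD (pc ++ p.1 :: rest.map Prod.fst) ((pc.length : Nat) : Int) 0 = p.1 :=
      get_append_len _ _ _
    have hgd : PySem.List.pyGetD (pd ++ p.2 :: rest.map Prod.snd) ((pc.length : Nat) : Int) 0 = p.2 := by
      rw [h]; exact get_append_len _ _ _
    rw [hgc, hgd]
    by_cases h1 : K = 0
    · rw [if_pos h1]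
      simp only [phase1Z, if_pos h1]
      simp
    · rw [if_neg h1]
      by_cases hodd : PySem.Int.mod p.1 2 = 1
      · rw [if_pos hodd]
        by_cases hd : p.2 ≠ 0
        · rw [if_pos hd]
          have hsd : PySem.List.pySetD (pd ++ p.2 :: rest.map Prod.snd) ((pc.length : Nat) : Int)
              (p.2 - 1) = pd ++ (p.2 - 1) :: rest.map Prod.snd := by
            rw [h]; exact setD_append_len _ _ _ _
          rw [setD_append_len, hsd]
          have harr : pc ++ (p.1 + 1) :: rest.map Prod.fst = (pc ++ [p.1 + 1]) ++ rest.map Prod.fst := by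
            simp
          have harr2 : pd ++ (p.2 - 1) :: rest.map Prod.snd = (pd ++ [p.2 - 1]) ++ rest.map Prod.snd := by
            simp
          rw [harr, harr2]
          have hr : PySem.List.pyRange (((pc.length : Nat) : Int) + 1)
                ((pc.length + (rest.length + 1) : Nat) : Int) 1
              = PySem.List.pyRange (((pc ++ [p.1 + 1]).length : Nat) : Int)
                (((pc ++ [p.1 + 1]).length + rest.length : Nat) : Int) 1 := by
            congr 1 <;> push_cast <;> simp <;> ring
          rw [hr, ih (pc ++ [p.1 + 1]) (pd ++ [p.2 - 1]) (K - 1) (by simp [h])]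
          simp only [phase1Z, if_neg h1, if_pos (And.intro hodd hd), List.map_cons]
          simp
        · rw [if_neg hd]
          have hr : PySem.List.pyRange (((pc.length : Nat) : Int) + 1)
                ((pc.length + (rest.length + 1) : Nat) : Int) 1
              = PySem.List.pyRange (((pc ++ [p.1]).length : Nat) : Int)
                (((pc ++ [p.1]).length + rest.length : Nat) : Int) 1 := by
            congr 1 <;> push_cast <;> simp <;> ring
          have harr : pc ++ p.1 :: rest.map Prod.fst = (pc ++ [p.1]) ++ rest.map Prod.fst := by simp
          have harr2 : pd ++ p.2 :: rest.map Prod.snd = (pd ++ [p.2]) ++ rest.map Prod.snd := by simp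
          rw [harr, harr2, hr, ih (pc ++ [p.1]) (pd ++ [p.2]) K (by simp [h])]
          have hcond : ¬ (PySem.Int.mod p.1 2 = 1 ∧ p.2 ≠ 0) := by tauto
          simp only [phase1Z, if_neg h1, if_neg hcond, List.map_cons]
          simp
      · rw [if_neg hodd]
        have hr : PySem.List.pyRange (((pc.length : Nat) : Int) + 1)
              ((pc.length + (rest.length + 1) : Nat) : Int) 1
            = PySem.List.pyRange (((pc ++ [p.1]).length : Nat) : Int)
              (((pc ++ [p.1]).length + rest.length : Nat) : Int) 1 := by
          congr 1 <;> push_cast <;> simp <;> ring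
        have harr : pc ++ p.1 :: rest.map Prod.fst = (pc ++ [p.1]) ++ rest.map Prod.fst := by simp
        have harr2 : pd ++ p.2 :: rest.map Prod.snd = (pd ++ [p.2]) ++ rest.map Prod.snd := by simp
        rw [harr, harr2, hr, ih (pc ++ [p.1]) (pd ++ [p.2]) K (by simp [h])]
        have hcond : ¬ (PySem.Int.mod p.1 2 = 1 ∧ p.2 ≠ 0) := by tauto
        simp only [phase1Z, if_neg h1, if_neg hcond, List.map_cons]
        simp

theorem p2_deindex (suf : List (Int × Int)) : ∀ (pc pd : List Int) (K : Int),
    pc.length = pd.length →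
    (p2loopA (PySem.List.pyRange (pc.length : Int) ((pc.length + suf.length : Nat) : Int) 1) K
      (pc ++ suf.map Prod.fst) (pd ++ suf.map Prod.snd)).2
    = (pc ++ (phase2Z K suf).map Prod.fst, pd ++ (phase2Z K suf).map Prod.snd) := by
  induction suf with
  | nil =>
    intro pc pd K h
    rw [PySem.List.pyRange_one_eq_nil (by simp)]
    simp [p2loopA, phase2Z]
  | cons p rest ih =>
    intro pc pd K h
    simp only [List.length_cons]
    rw [PySem.List.pyRange_one_cons (by push_cast; omega)]
    simp only [p2loopA, List.map_cons]
    have hgc : PySem.List.pyGetD (pc ++ p.1 :: rest.map Prod.fst) ((pc.length : Nat) : Int) 0 = p.1 :=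
      get_append_len _ _ _
    have hgd : PySem.List.pyGetD (pd ++ p.2 :: rest.map Prod.snd) ((pc.length : Nat) : Int) 0 = p.2 := by
      rw [h]; exact get_append_len _ _ _
    rw [hgc, hgd]
    have hsc : PySem.List.pySetD (pc ++ p.1 :: rest.map Prod.fst) ((pc.length : Nat) : Int)
        (p2whileA K p.1 p.2).2.1 = pc ++ (p2whileA K p.1 p.2).2.1 :: rest.map Prod.fst :=
      setD_append_len _ _ _ _
    have hsd : PySem.List.pySetD (pd ++ p.2 :: rest.map Prod.snd) ((pc.length : Nat) : Int)
        (p2whileA K p.1 p.2).2.2 = pd ++ (p2whileA K p.1 p.2).2.2 :: rest.map Prod.snd := by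
      rw [h]; exact setD_append_len _ _ _ _
    rw [hsc, hsd]
    by_cases hbr : (p2whileA K p.1 p.2).1 < 2
    · rw [if_pos hbr]
      simp only [phase2Z, if_pos hbr, List.map_cons]
    · rw [if_neg hbr]
      have harr : pc ++ (p2whileA K p.1 p.2).2.1 :: rest.map Prod.fst
          = (pc ++ [(p2whileA K p.1 p.2).2.1]) ++ rest.map Prod.fst := by simp
      have harr2 : pd ++ (p2whileA K p.1 p.2).2.2 :: rest.map Prod.snd
          = (pd ++ [(p2whileA K p.1 p.2).2.2]) ++ rest.map Prod.snd := by simp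
      have hr : PySem.List.pyRange (((pc.length : Nat) : Int) + 1)
            ((pc.length + (rest.length + 1) : Nat) : Int) 1
          = PySem.List.pyRange ((((pc ++ [(p2whileA K p.1 p.2).2.1]).length : Nat)) : Int)
            (((pc ++ [(p2whileA K p.1 p.2).2.1]).length + rest.length : Nat) : Int) 1 := by
        congr 1 <;> push_cast <;> simp <;> ring
      rw [harr, harr2, hr, ih _ _ ((p2whileA K p.1 p.2).1) (by simp [h])]
      simp only [phase2Z, if_neg hbr, List.map_cons]
      simp

-- counting stage
theorem count_len (C : List Int) : ∀ init : List Int,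
    (C.foldl (fun a x => PySem.List.pySetD a (x - 1) (PySem.List.pyGetD a (x - 1) 0 + 1))
      init).length = init.length := by
  induction C with
  | nil => intro init; rfl
  | cons x rest ih =>
    intro init
    rw [List.foldl_cons, ih]
    exact PySem.List.length_pySetD _ _ _

theorem pyIdx?_lt (n : Nat) (i : Int) (k : Nat) (h : PySem.List.pyIdx? n i = some k) : k < n := by
  unfold PySem.List.pyIdx? at h
  split_ifs at h <;> simp_all <;> omega

theorem nonneg_pyGetD (a : List Int) (i : Int) (h : ∀ v ∈ a, 0 ≤ v) :
    0 ≤ PySem.List.pyGetD a i 0 := by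
  unfold PySem.List.pyGetD PySem.List.pyGet? at *
  rcases hk : PySem.List.pyIdx? a.length i with _ | k
  · simp [hk]
  · have hlt : k < a.length := pyIdx?_lt _ _ _ hk
    simp [hk, List.getElem?_eq_getElem hlt]
    exact h _ (List.getElem_mem hlt)

theorem mem_pySetD (a : List Int) (i w x : Int) (h : x ∈ PySem.List.pySetD a i w) : x ∈ a ∨ x = w := by
  unfold PySem.List.pySetD PySem.List.pySet? at h
  rcases hk : PySem.List.pyIdx? a.length i with _ | k
  · rw [hk] at h; simp at h; exact Or.inl h
  · rw [hk] at h
    simp only [Option.map_some, Option.getD_some] at h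
    rcases List.mem_or_eq_of_mem_set h with h1 | h2
    · exact Or.inl h1
    · exact Or.inr h2

theorem count_nonneg (C : List Int) : ∀ init : List Int, (∀ v ∈ init, 0 ≤ v) →
    ∀ v ∈ C.foldl (fun a x => PySem.List.pySetD a (x - 1) (PySem.List.pyGetD a (x - 1) 0 + 1))
      init, 0 ≤ v := by
  induction C with
  | nil => intro init h; exact h
  | cons x rest ih =>
    intro init h
    rw [List.foldl_cons]
    refine ih _ ?_
    intro v hv
    rcases mem_pySetD _ _ _ _ hv with h1 | h2
    · exact h _ h1
    · have := nonneg_pyGetD init (x - 1) h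
      omega

-- everything after the counting stage, in terms of the count arrays
theorem main_core (K mx : Int) (hK : 0 ≤ K) (cc cd : List Int)
    (hlen : cd.length = cc.length) (hmx : mx.toNat = cc.length)
    (hcc : ∀ v ∈ cc, 0 ≤ v) (hcd : ∀ v ∈ cd, 0 ≤ v) :
    (let r1 := p1loopA (PySem.List.pyRange 0 mx 1) K cc cd
     let r2 := if r1.1 > 1 then p2loopA (PySem.List.pyRange 0 mx 1) r1.1 r1.2.1 r1.2.2 else r1
     (PySem.List.pyRange 0 mx 1).foldl
       (fun t i => t + PySem.Int.floordiv (PySem.List.pyGetD r2.2.1 i 0) 2) 0)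
    = (let base := (cc.map (fun v => PySem.Int.floordiv v 2)).sum
       let oddWithDirty := (cc.zip cd).foldl
         (fun n p => if PySem.Int.mod p.1 2 = 1 ∧ p.2 > 0 then n + 1 else n) (0 : Int)
       let matched := min K oddWithDirty
       let K2 := K - matched
       if K2 > 1 then
         let dirtyPairs := ((cc.zip cd).map
           (fun p => if PySem.Int.mod p.1 2 = 1 ∧ p.2 > 0
                     then PySem.Int.floordiv (p.2 - 1) 2 else PySem.Int.floordiv p.2 2)).sum
         base + matched + min (PySem.Int.floordiv K2 2) dirtyPairs
       else base + matched) := by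
  dsimp only
  by_cases h0 : 0 ≤ mx
  · -- main case: mx = ↑cc.length
    have hmxn : mx = (cc.length : Int) := by omega
    have hfst : (cc.zip cd).map Prod.fst = cc := List.map_fst_zip (le_of_eq hlen.symm)
    have hsnd : (cc.zip cd).map Prod.snd = cd := List.map_snd_zip (le_of_eq hlen)
    have hlZ : (cc.zip cd).length = cc.length := by simp [List.length_zip, hlen]
    have hcdl : ∀ p ∈ cc.zip cd, 0 ≤ p.2 := by
      intro p hp
      obtain ⟨a, b⟩ := p
      exact hcd b (List.of_mem_zip hp).2
    have hcnn := cntZ_nonneg (cc.zip cd)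
    -- phase 1
    have hA1 : p1loopA (PySem.List.pyRange 0 mx 1) K cc cd
        = ((phase1Z K (cc.zip cd)).1, (phase1Z K (cc.zip cd)).2.map Prod.fst,
            (phase1Z K (cc.zip cd)).2.map Prod.snd) := by
      have h := p1_deindex (cc.zip cd) [] [] K rfl
      simp only [List.length_nil, List.nil_append, Nat.cast_zero, Nat.zero_add, Nat.add_zero,
        zero_add, hfst, hsnd, hlZ] at h
      rw [hmxn]
      exact h
    have hK1 : (phase1Z K (cc.zip cd)).1 = K - min K (cntZ (cc.zip cd)) :=
      phase1Z_fst (cc.zip cd) K hK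
    have hz1len : (phase1Z K (cc.zip cd)).2.length = cc.length := by
      rw [phase1Z_len, hlZ]
    -- B-side bridges
    have hbase : (cc.map (fun v => PySem.Int.floordiv v 2)).sum = csZ (cc.zip cd) := by
      rw [csZ, show (fun p : Int × Int => PySem.Int.floordiv p.1 2)
            = (fun v => PySem.Int.floordiv v 2) ∘ Prod.fst from rfl,
          ← List.map_map, hfst]
    have hcongr : List.countP (fun p : Int × Int => decide (PySem.Int.mod p.1 2 = 1 ∧ p.2 > 0))
        (cc.zip cd)
        = List.countP (fun p : Int × Int => decide (PySem.Int.mod p.1 2 = 1 ∧ p.2 ≠ 0))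
          (cc.zip cd) := by
      apply List.countP_congr
      intro p hp
      have := hcdl p hp
      simp only [decide_eq_true_eq]
      constructor <;> (intro h; exact ⟨h.1, by omega⟩)
    have hodd : (cc.zip cd).foldl
        (fun n p => if PySem.Int.mod p.1 2 = 1 ∧ p.2 > 0 then n + 1 else n) (0 : Int)
        = cntZ (cc.zip cd) := by
      rw [PySem.List.foldl_ite_add_one, cntZ, hcongr]
      omega
    rw [hA1, hodd, hbase, hK1]
    by_cases hgt : K - min K (cntZ (cc.zip cd)) > 1
    · rw [if_pos hgt, if_pos hgt]
      have hcle : cntZ (cc.zip cd) ≤ K := by omega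
      have hz1 : (phase1Z K (cc.zip cd)).2 = (cc.zip cd).map adjZ :=
        phase1Z_all (cc.zip cd) K hcle hK
      -- phase 2 de-indexed
      have hA2 : (p2loopA (PySem.List.pyRange 0 mx 1) (K - min K (cntZ (cc.zip cd)))
            ((phase1Z K (cc.zip cd)).2.map Prod.fst) ((phase1Z K (cc.zip cd)).2.map Prod.snd)).2
          = ((phase2Z (K - min K (cntZ (cc.zip cd))) (phase1Z K (cc.zip cd)).2).map Prod.fst,
             (phase2Z (K - min K (cntZ (cc.zip cd))) (phase1Z K (cc.zip cd)).2).map Prod.snd) := by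
        have h := p2_deindex (phase1Z K (cc.zip cd)).2 [] [] (K - min K (cntZ (cc.zip cd))) rfl
        simp only [List.length_nil, List.nil_append, Nat.cast_zero, Nat.zero_add, Nat.add_zero,
          zero_add, hz1len] at h
        rw [hmxn]
        exact h
      rw [hA2]
      -- the final sum
      set z2 := phase2Z (K - min K (cntZ (cc.zip cd))) (phase1Z K (cc.zip cd)).2 with hz2def
      have hz2len : (z2.map Prod.fst).length = cc.length := by
        rw [List.length_map, hz2def, phase2Z_len, hz1len]
      have hsum : (PySem.List.pyRange 0 mx 1).foldl
          (fun t i => t + PySem.Int.floordiv (PySem.List.pyGetD (z2.map Prod.fst) i 0) 2) 0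
          = csZ z2 := by
        rw [hmxn, ← hz2len,
          PySem.List.foldl_pyRange_zero_pyGetD' (z2.map Prod.fst) 0
            (fun t v => t + PySem.Int.floordiv v 2) 0,
          PySem.List.foldl_add (g := fun v => PySem.Int.floordiv v 2), List.map_map, csZ]
        simp [Function.comp_def, fd2]
      rw [hsum, hz2def, hz1]
      have hadjpos : ∀ p ∈ (cc.zip cd).map adjZ, 0 ≤ p.2 := by
        intro p hp
        obtain ⟨q, hq, rfl⟩ := List.mem_map.mp hp
        have := hcdl q hq
        unfold adjZ
        split_ifs with h <;> simp <;> omega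
      rw [phase2Z_cs ((cc.zip cd).map adjZ) (K - min K (cntZ (cc.zip cd))) (by omega) hadjpos,
        ← hz1, phase1Z_cs (cc.zip cd) K hK, hz1]
      -- dirtyPairs = dsZ of the adjusted list
      have hdp : ((cc.zip cd).map
          (fun p => if PySem.Int.mod p.1 2 = 1 ∧ p.2 > 0
                    then PySem.Int.floordiv (p.2 - 1) 2 else PySem.Int.floordiv p.2 2)).sum
          = dsZ ((cc.zip cd).map adjZ) := by
        rw [dsZ, List.map_map]
        apply congrArg
        apply List.map_congr_left
        intro p hp
        have := hcdl p hp
        simp only [Function.comp, adjZ]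
        by_cases h : PySem.Int.mod p.1 2 = 1 ∧ p.2 ≠ 0
        · rw [if_pos h, if_pos ⟨h.1, by omega⟩]
        · rw [if_neg h]
          by_cases h1 : PySem.Int.mod p.1 2 = 1 ∧ p.2 > 0
          · exact absurd ⟨h1.1, by omega⟩ h
          · rw [if_neg h1]
      rw [hdp]
    · rw [if_neg hgt, if_neg hgt]
      have hsum : (PySem.List.pyRange 0 mx 1).foldl
          (fun t i => t + PySem.Int.floordiv
            (PySem.List.pyGetD ((phase1Z K (cc.zip cd)).2.map Prod.fst) i 0) 2) 0
          = csZ (phase1Z K (cc.zip cd)).2 := by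
        have hl1 : ((phase1Z K (cc.zip cd)).2.map Prod.fst).length = cc.length := by
          rw [List.length_map, hz1len]
        rw [hmxn, ← hl1,
          PySem.List.foldl_pyRange_zero_pyGetD' ((phase1Z K (cc.zip cd)).2.map Prod.fst) 0
            (fun t v => t + PySem.Int.floordiv v 2) 0,
          PySem.List.foldl_add (g := fun v => PySem.Int.floordiv v 2), List.map_map, csZ]
        simp [Function.comp_def, fd2]
      rw [hsum, phase1Z_cs (cc.zip cd) K hK]
  · -- degenerate: mx < 0, so the arrays are empty and both sides are 0
    have hcc0 : cc = [] := by
      have : cc.length = 0 := by omega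
      exact List.length_eq_zero_iff.mp this
    have hcd0 : cd = [] := by
      have : cd.length = 0 := by omega
      exact List.length_eq_zero_iff.mp this
    subst hcc0; subst hcd0
    rw [PySem.List.pyRange_one_eq_nil (by omega)]
    simp only [p1loopA, List.zip_nil_left, List.map_nil, List.sum_nil, List.foldl_nil]
    have hmin0 : min K (0 : Int) = 0 := by omega
    rw [hmin0]
    split_ifs with hb <;> simp [fd2] <;> omega

-- ===== VERDICT (by name: the statement is the Claim_ definition above) =====
theorem solution_spec : Claim_equal_solution := by
  intro K C D hdom hpre
  obtain ⟨hC, hD, hK, -⟩ := hpre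
  unfold Spec_solution solution solution_alt
  simp only
  rw [PySem.List.foldl_pyRange_zero_pyGetD' C 0
        (fun a x => PySem.List.pySetD a (x - 1) (PySem.List.pyGetD a (x - 1) 0 + 1)),
      PySem.List.foldl_pyRange_zero_pyGetD' D 0
        (fun a x => PySem.List.pySetD a (x - 1) (PySem.List.pyGetD a (x - 1) 0 + 1))]
  set mx := max ((PySem.List.max? C fun y => y).getD 0) ((PySem.List.max? D fun y => y).getD 0) with hmxdef
  set cc := List.foldl (fun a x => PySem.List.pySetD a (x - 1) (PySem.List.pyGetD a (x - 1) 0 + 1))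
    (List.replicate mx.toNat (0 : Int)) C with hccdef
  set cd := List.foldl (fun a x => PySem.List.pySetD a (x - 1) (PySem.List.pyGetD a (x - 1) 0 + 1))
    (List.replicate mx.toNat (0 : Int)) D with hcddef
  have hrep : ∀ v ∈ List.replicate mx.toNat (0 : Int), 0 ≤ v := by
    intro v hv
    rw [List.eq_of_mem_replicate hv]
  have hlc : cc.length = mx.toNat := by
    rw [hccdef]
    exact (count_len C _).trans (List.length_replicate)
  have hld : cd.length = mx.toNat := by
    rw [hcddef]
    exact (count_len D _).trans (List.length_replicate)
  exact main_core K mx hK cc cd (hld.trans hlc.symm) hlc.symm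
    (count_nonneg C _ hrep) (count_nonneg D _ hrep)
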